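-- pv_equiv track=rewrite | github.com/leonardotessarolo/markov_chains | vlmc/vlmc/utils.py | count_transitions_ocurrences
-- ===== SOURCE A (Python) =====
-- def count_word_ocurrences(
--     X,
--     word
-- ):
--     """
--         Counts the number of ocurrences of word in sample X.
--     """
--
--     l=len(word)
--     counts=0
--     for i in range(l, len(X)+1):
--         if X[i-l:i] == word:
--             counts += 1
--     return counts
--
-- def count_transitions_ocurrences(
--     X,
--     vocabulary,
--     word
-- ):
--     """
--         Counts the number of transitions in X from word to each symbol in vocabulary.
--     """
--
--     counts = [
--         count_word_ocurrences(
--             X=X,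
--             word=word+s
--         ) for s in vocabulary
--     ]
--
--     return {
--         word: {
--             str(s): c for s, c in zip(vocabulary, counts)
--         }
--     }
-- ===== SOURCE B (Python) =====
-- def count_transitions_ocurrences(X, vocabulary, word):
--     """Single scan: find every position where word ends, then count per-symbol
--     which vocabulary symbol follows each occurrence."""
--     l = len(word)
--     occ = [i for i in range(l, len(X) + 1) if X[i - l:i] == word]
--     inner = {}
--     for s in vocabulary:
--         ls = len(s)
--         inner[str(s)] = sum(1 for i in occ if X[i:i + ls] == s)
--     return {word: inner}
-- ===== Notes on version B (the rewrite author's own statement) =====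
-- stated objective: faster
-- what changed: Instead of re-scanning the whole sample X once per vocabulary symbol for the pattern word+s, B scans X once to collect the end positions of all occurrences of word and then, per symbol, only tests the short suffix following each occurrence.
import Mathlib
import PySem

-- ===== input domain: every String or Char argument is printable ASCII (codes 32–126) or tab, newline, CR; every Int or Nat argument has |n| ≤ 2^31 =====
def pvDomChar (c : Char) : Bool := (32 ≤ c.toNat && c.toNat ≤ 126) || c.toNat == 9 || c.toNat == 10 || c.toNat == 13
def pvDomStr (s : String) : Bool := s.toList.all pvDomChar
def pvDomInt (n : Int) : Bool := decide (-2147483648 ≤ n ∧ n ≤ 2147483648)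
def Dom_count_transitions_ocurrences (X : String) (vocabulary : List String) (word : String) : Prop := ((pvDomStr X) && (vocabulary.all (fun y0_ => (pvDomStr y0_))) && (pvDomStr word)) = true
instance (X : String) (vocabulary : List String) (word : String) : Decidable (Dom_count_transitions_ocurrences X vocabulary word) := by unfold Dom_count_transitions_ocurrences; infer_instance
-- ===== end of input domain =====

-- B replaces A's per-symbol full re-scan of X (for the pattern word+s) by one scan collecting
-- the end positions of all occurrences of word, then a short suffix test per symbol per occurrence.

-- ===== PORT A =====
-- port of helper count_word_ocurrences: scan i in range(l, len(X)+1), count X[i-l:i] == word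
def count_word_ocurrences (X : String) (word : String) : Int :=
  let L := X.toList
  let w := word.toList
  let l : Int := (w.length : Int)
  (PySem.List.pyRange l ((L.length : Int) + 1) 1).foldl
    (fun counts i =>
      if PySem.List.slice L (some (i - l)) (some i) == w then counts + 1 else counts) 0

def count_transitions_ocurrences (X : String) (vocabulary : List String) (word : String) :
    List (String × List (String × Int)) :=
  let counts := vocabulary.map (fun s =>
    count_word_ocurrences X (String.ofList (word.toList ++ s.toList)))
  [(word, ((vocabulary.zip counts).foldl
      (fun d p => PySem.Dict.insert d p.1 p.2) (PySem.Dict.mk ([] : List (String × Int)))).items)]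

-- ===== PORT B =====
def count_transitions_ocurrences_alt (X : String) (vocabulary : List String) (word : String) :
    List (String × List (String × Int)) :=
  let L := X.toList
  let l : Int := (word.toList.length : Int)
  let occ := (PySem.List.pyRange l ((L.length : Int) + 1) 1).filter
    (fun i => PySem.List.slice L (some (i - l)) (some i) == word.toList)
  let inner := vocabulary.foldl
    (fun d s => PySem.Dict.insert d s
      ((occ.countP (fun i =>
          PySem.List.slice L (some i) (some (i + (s.toList.length : Int))) == s.toList) : Nat) : Int))
    (PySem.Dict.mk ([] : List (String × Int)))
  [(word, inner.items)]

-- ===== PRECONDITION & SPEC =====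
def Spec_count_transitions_ocurrences (X : String) (vocabulary : List String) (word : String) (out : List (String × List (String × Int))) : Prop := out = count_transitions_ocurrences_alt X vocabulary word
instance (X : String) (vocabulary : List String) (word : String) (out : List (String × List (String × Int))) : Decidable (Spec_count_transitions_ocurrences X vocabulary word out) := by unfold Spec_count_transitions_ocurrences; infer_instance

-- ===== CLAIM (what is proved, stated in full; the proofs are below) =====
def Claim_equal_count_transitions_ocurrences : Prop := ∀ (X : String) (vocabulary : List String) (word : String), Dom_count_transitions_ocurrences X vocabulary word → Spec_count_transitions_ocurrences X vocabulary word (count_transitions_ocurrences X vocabulary word)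

-- ===== LEMMAS AND PROOFS =====

-- splitting a long-enough take at the length of w
lemma take_append_iff (u w t : List Char) (h : w.length + t.length ≤ u.length) :
    (u.take (w.length + t.length) = w ++ t) ↔
      (u.take w.length = w ∧ (u.drop w.length).take t.length = t) := by
  rw [List.take_add]
  constructor
  · intro h'
    refine List.append_inj' h' ?_
    simp [List.length_take, List.length_drop]
    omega
  · rintro ⟨h1, h2⟩
    rw [h1, h2]

-- A's scan for u, re-indexed over Nat: it counts the k with X[k:k+|u|] == u
lemma countA (L u : List Char) :
    List.countP (fun i => PySem.List.slice L (some (i - (u.length : Int))) (some i) == u)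
      (PySem.List.pyRange (u.length : Int) ((L.length : Int) + 1) 1)
    = List.countP (fun k => ((L.drop k).take u.length == u))
        (List.range (L.length + 1 - u.length)) := by
  rw [PySem.List.pyRange_one, List.countP_map]
  have hc : (((L.length : Int)) + 1 - (u.length : Int)).toNat = L.length + 1 - u.length := by
    omega
  rw [hc]
  apply List.countP_congr
  intro k _
  simp only [Function.comp_apply]
  have h1 : (u.length : Int) + (k : Int) - (u.length : Int) = ((k : Nat) : Int) := by omega
  have h2 : (u.length : Int) + (k : Int) = ((k : Nat) : Int) + ((u.length : Nat) : Int) := by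
    omega
  rw [h1, h2, PySem.List.slice_natCast_add]

-- B's count over the occurrence list, re-indexed over Nat
lemma countB (L w t : List Char) :
    List.countP (fun i => PySem.List.slice L (some i) (some (i + (t.length : Int))) == t)
      ((PySem.List.pyRange (w.length : Int) ((L.length : Int) + 1) 1).filter
        (fun i => PySem.List.slice L (some (i - (w.length : Int))) (some i) == w))
    = List.countP (fun k =>
        (((L.drop (w.length + k)).take t.length == t) && ((L.drop k).take w.length == w)))
        (List.range (L.length + 1 - w.length)) := by
  rw [List.countP_filter, PySem.List.pyRange_one, List.countP_map]
  have hc : (((L.length : Int)) + 1 - (w.length : Int)).toNat = L.length + 1 - w.length := by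
    omega
  rw [hc]
  apply List.countP_congr
  intro k _
  simp only [Function.comp_apply]
  have h1 : (w.length : Int) + (k : Int) - (w.length : Int) = ((k : Nat) : Int) := by omega
  have h4 : (w.length : Int) + (k : Int) = ((k : Nat) : Int) + ((w.length : Nat) : Int) := by
    ring
  rw [h1, h4, PySem.List.slice_natCast_add]
  have h5 : ((k : Nat) : Int) + ((w.length : Nat) : Int) = ((w.length + k : Nat) : Int) := by
    push_cast; ring
  rw [h5, PySem.List.slice_natCast_add]

-- the core counting identity: occurrences of w++t = occurrences of w followed by t
lemma count_split (L w t : List Char) :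
    List.countP (fun k => ((L.drop k).take (w.length + t.length) == w ++ t))
      (List.range (L.length + 1 - (w.length + t.length)))
    = List.countP (fun k =>
        (((L.drop (w.length + k)).take t.length == t) && ((L.drop k).take w.length == w)))
      (List.range (L.length + 1 - w.length)) := by
  set n := L.length with hn
  set lw := w.length with hlw
  set lt := t.length with hlt
  have hsplit : n + 1 - lw = (n + 1 - (lw + lt)) + ((n + 1 - lw) - (n + 1 - (lw + lt))) := by
    omega
  rw [hsplit, List.range_add, List.countP_append]
  have hzero : List.countP (fun k =>
        (((L.drop (lw + k)).take lt == t) && ((L.drop k).take lw == w)))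
      (List.map (fun x => (n + 1 - (lw + lt)) + x)
        (List.range ((n + 1 - lw) - (n + 1 - (lw + lt))))) = 0 := by
    rw [List.countP_eq_zero]
    intro k hk
    simp only [List.mem_map, List.mem_range] at hk
    obtain ⟨x, hx, rfl⟩ := hk
    simp only [Bool.and_eq_true, beq_iff_eq, not_and]
    intro hcontra _
    have hlen := congrArg List.length hcontra
    simp only [List.length_take, List.length_drop, ← hn, ← hlt] at hlen
    omega
  rw [hzero, Nat.add_zero]
  apply List.countP_congr
  intro k hk
  simp only [List.mem_range] at hk
  have hb : lw + lt ≤ (L.drop k).length := by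
    simp only [List.length_drop, ← hn]
    omega
  simp only [beq_iff_eq, Bool.and_eq_true]
  rw [take_append_iff _ _ _ hb, List.drop_drop]
  constructor
  · rintro ⟨h1, h2⟩
    exact ⟨by rw [Nat.add_comm] at h2; exact h2, h1⟩
  · rintro ⟨h2, h1⟩
    exact ⟨h1, by rw [Nat.add_comm]; exact h2⟩

-- A's helper applied to word+s equals B's per-symbol count over the occurrence list
lemma count_eq (X word s : String) :
    count_word_ocurrences X (String.ofList (word.toList ++ s.toList))
    = ((((PySem.List.pyRange ((word.toList.length : Int)) ((X.toList.length : Int) + 1) 1).filter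
          (fun i => PySem.List.slice X.toList
            (some (i - (word.toList.length : Int))) (some i) == word.toList)).countP
        (fun i => PySem.List.slice X.toList
            (some i) (some (i + (s.toList.length : Int))) == s.toList) : Nat) : Int) := by
  unfold count_word_ocurrences
  simp only [String.toList_ofList]
  rw [PySem.List.foldl_count_if, zero_add]
  congr 1
  rw [countA, countB]
  simp only [List.length_append]
  exact count_split X.toList word.toList s.toList

lemma zip_self_map {α β : Type} (l : List α) (f : α → β) :
    l.zip (l.map f) = l.map (fun a => (a, f a)) := by
  induction l with
  | nil => rfl
  | cons a l ih => simp [ih]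

-- ===== VERDICT (by name: the statement is the Claim_ definition above) =====
theorem count_transitions_ocurrences_spec : Claim_equal_count_transitions_ocurrences := by
  intro X vocabulary word _
  unfold Spec_count_transitions_ocurrences count_transitions_ocurrences
    count_transitions_ocurrences_alt
  simp only [zip_self_map, List.foldl_map, count_eq]
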